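-- pv_equiv track=rewrite | github.com/Elijah-Code/Algorithms-and-DS | find_elem.py | findOnce
-- ===== SOURCE A (Python) =====
-- def findOnce(arr : list, n : int):
--
--     start = 0
--     end = n-1
--     while start <= end:
--
--         if start == n-1: return arr[start]
--
--         mid = (end + start) // 2
--
--         if mid % 2 == 0 and arr[mid] == arr[mid+1]:
--             start = mid + 1
--
--         if mid % 2 == 0 and arr[mid] != arr[mid+1]:
--             end = mid - 1
--
--         if mid % 2 != 0:
--             if arr[mid] == arr[mid+1]:
--                 end = mid - 1
--             else:
--                 start = mid + 1
--
--     return arr[start]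
-- ===== SOURCE B (Python) =====
-- def findOnce(arr, n):
--     def go(start, end):
--         if start > end or start == n - 1:
--             return arr[start]
--         mid = (start + end) // 2
--         if (mid % 2 == 0) == (arr[mid] == arr[mid + 1]):
--             return go(mid + 1, end)
--         return go(start, mid - 1)
--     return go(0, n - 1)
-- ===== Notes on version B (the rewrite author's own statement) =====
-- stated objective: simpler
-- what changed: The iterative binary search with three sequential branch-updating ifs is recast as a recursive helper go(start, end) whose direction is decided by one merged condition ((mid even) == (arr[mid] == arr[mid+1])).
-- outside the precondition, e.g. on findOnce([2, 2, 2], 4): A returns 2, B returns 2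
import Mathlib
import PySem

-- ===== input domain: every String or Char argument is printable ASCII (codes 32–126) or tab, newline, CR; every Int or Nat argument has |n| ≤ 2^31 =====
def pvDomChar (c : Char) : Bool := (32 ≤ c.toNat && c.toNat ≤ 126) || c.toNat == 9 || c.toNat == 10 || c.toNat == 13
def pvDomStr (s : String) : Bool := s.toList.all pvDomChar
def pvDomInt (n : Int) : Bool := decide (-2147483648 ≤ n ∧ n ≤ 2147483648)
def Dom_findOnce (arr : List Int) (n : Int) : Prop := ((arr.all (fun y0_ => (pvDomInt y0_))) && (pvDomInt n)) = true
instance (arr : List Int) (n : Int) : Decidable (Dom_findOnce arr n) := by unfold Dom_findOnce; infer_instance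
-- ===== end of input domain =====

-- B restates the iterative binary search as a recursive helper with a single
-- merged direction test (objective: simpler — one condition instead of three
-- sequential ifs; no speed claim).
-- All indexing uses PySem.List.pyGet? with .getD 0; exact on Pre_ (indices in range there).
-- Both loops are written with a fuel parameter (n.toNat + 1, strictly more than the
-- loop can iterate, since end+1-start shrinks every step); the fuel-0 branch is unreachable.

-- ===== PORT A =====
def findOnceLoop (arr : List Int) (n : Int) : Nat → Int → Int → Int
  | 0, start, _ => (PySem.List.pyGet? arr start).getD 0
  | fuel + 1, start, end_ =>
    if start ≤ end_ then
      if start = n - 1 then (PySem.List.pyGet? arr start).getD 0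
      else
        let mid := PySem.Int.floordiv (end_ + start) 2
        let am := (PySem.List.pyGet? arr mid).getD 0
        let am1 := (PySem.List.pyGet? arr (mid + 1)).getD 0
        -- the three sequential ifs of A, each rebinding start/end
        let s1 := if PySem.Int.mod mid 2 = 0 ∧ am = am1 then mid + 1 else start
        let e1 := if PySem.Int.mod mid 2 = 0 ∧ am ≠ am1 then mid - 1 else end_
        let s2 := if PySem.Int.mod mid 2 ≠ 0 ∧ am ≠ am1 then mid + 1 else s1
        let e2 := if PySem.Int.mod mid 2 ≠ 0 ∧ am = am1 then mid - 1 else e1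
        findOnceLoop arr n fuel s2 e2
    else (PySem.List.pyGet? arr start).getD 0

def findOnce (arr : List Int) (n : Int) : Int :=
  findOnceLoop arr n (n.toNat + 1) 0 (n - 1)

-- ===== PORT B =====
def findOnceGo (arr : List Int) (n : Int) : Nat → Int → Int → Int
  | 0, start, _ => (PySem.List.pyGet? arr start).getD 0
  | fuel + 1, start, end_ =>
    if start > end_ ∨ start = n - 1 then (PySem.List.pyGet? arr start).getD 0
    else
      let mid := PySem.Int.floordiv (start + end_) 2
      if (PySem.Int.mod mid 2 = 0) =
          ((PySem.List.pyGet? arr mid).getD 0 = (PySem.List.pyGet? arr (mid + 1)).getD 0)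
      then findOnceGo arr n fuel (mid + 1) end_
      else findOnceGo arr n fuel start (mid - 1)

def findOnce_alt (arr : List Int) (n : Int) : Int :=
  findOnceGo arr n (n.toNat + 1) 0 (n - 1)

-- ===== PRECONDITION & SPEC =====
-- Pre_ excludes the empty list and n > len(arr): there A's out-of-range
-- accesses generally raise IndexError (the rare such inputs on which A still
-- returns are excluded with it; B returns the same value on them).
def Pre_findOnce (arr : List Int) (n : Int) : Prop := arr ≠ [] ∧ n ≤ arr.length
instance (arr : List Int) (n : Int) : Decidable (Pre_findOnce arr n) := by
  unfold Pre_findOnce; infer_instance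
def pvWitness_findOnce : List Int × Int := ([4, 4, 7, 9, 9], 5)
def Spec_findOnce (arr : List Int) (n : Int) (out : Int) : Prop := out = findOnce_alt arr n
instance (arr : List Int) (n : Int) (out : Int) : Decidable (Spec_findOnce arr n out) := by
  unfold Spec_findOnce; infer_instance

-- ===== CLAIM (what is proved, stated in full; the proofs are below) =====
def Claim_equal_findOnce : Prop := ∀ (arr : List Int) (n : Int),
  Dom_findOnce arr n → Pre_findOnce arr n → Spec_findOnce arr n (findOnce arr n)

-- ===== LEMMAS AND PROOFS =====

theorem loop_eq_go (arr : List Int) (n : Int) :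
    ∀ (fuel : Nat) (s e : Int), (e + 1 - s).toNat < fuel →
      findOnceLoop arr n fuel s e = findOnceGo arr n fuel s e := by
  intro fuel
  induction fuel with
  | zero => intro s e hk; omega
  | succ k ih =>
    intro s e hk
    rw [findOnceLoop, findOnceGo]
    by_cases hse : s ≤ e
    · by_cases hn : s = n - 1
      · simp [hn]
      · have hb := PySem.Int.floordiv_two_mid_bounds hse
        simp only [hse, if_pos, hn, if_neg, not_false_iff]
        rw [show e + s = s + e by ring]
        set mid := PySem.Int.floordiv (s + e) 2 with hmid
        set am := (PySem.List.pyGet? arr mid).getD 0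
        set am1 := (PySem.List.pyGet? arr (mid + 1)).getD 0
        by_cases hpar : PySem.Int.mod mid 2 = 0 <;> by_cases heq : am = am1 <;>
          simp only [hpar, heq, if_pos, if_neg, and_true, and_false,
            not_true, not_false_iff, ne_eq, eq_iff_iff, iff_true, iff_false] <;>
          (rw [if_neg (not_or.mpr ⟨by omega, not_false⟩)]; exact ih _ _ (by omega))
    · simp [hse, show s > e ∨ s = n - 1 from Or.inl (by omega)]

-- ===== VERDICT (by name: the statement is the Claim_ definition above) =====
theorem findOnce_spec : Claim_equal_findOnce := by
  intro arr n _ _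
  unfold Spec_findOnce findOnce findOnce_alt
  exact loop_eq_go arr n (n.toNat + 1) 0 (n - 1) (by omega)
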